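-- pv_equiv track=rewrite | github.com/kishwarshafin/nanopore-helpers | fix_fasta.py | check_if_line_is_only_sequence
-- ===== SOURCE A (Python) =====
-- def check_if_line_is_only_sequence(line):
--     line_list = list(line)
--     for elm in line_list:
--         if elm == 'A' or elm == 'C' or elm == 'G' or elm == 'T' or elm == 'N':
--             continue
--         else:
--             return False
--
--     return True
-- ===== SOURCE B (Python) =====
-- def check_if_line_is_only_sequence(line):
--     # Histogram approach: count every character once, then check that the
--     # occurrences of the five allowed letters account for the whole line.
--     freq = {}
--     for elm in line:
--         freq[elm] = freq.get(elm, 0) + 1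
--     matched = 0
--     for c in 'ACGTN':
--         matched += freq.get(c, 0)
--     return matched == len(line)
-- ===== Notes on version B (the rewrite author's own statement) =====
-- stated objective: alternative
-- what changed: Replaces the per-character early-exit membership loop with a histogram algorithm: build a character-frequency dict in one pass, sum the counts of the five allowed letters, and compare that total with the line length.
import Mathlib
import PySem

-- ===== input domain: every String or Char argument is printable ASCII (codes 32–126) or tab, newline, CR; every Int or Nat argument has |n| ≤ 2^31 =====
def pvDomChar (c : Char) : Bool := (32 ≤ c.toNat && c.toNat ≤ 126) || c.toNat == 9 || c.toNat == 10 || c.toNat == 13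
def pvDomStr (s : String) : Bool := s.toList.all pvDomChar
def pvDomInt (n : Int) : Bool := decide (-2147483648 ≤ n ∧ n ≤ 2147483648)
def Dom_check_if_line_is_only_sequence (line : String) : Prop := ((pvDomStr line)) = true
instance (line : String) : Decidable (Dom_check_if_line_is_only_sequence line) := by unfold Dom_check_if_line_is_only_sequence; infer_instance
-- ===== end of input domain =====

-- B replaces the early-exit membership loop with a histogram: build a
-- character-frequency dict, sum the five allowed letters' counts, compare with len(line).

-- ===== PORT A =====
-- the for-loop over list(line) with its early `return False`
def checkLoopA : List Char → Bool
  | [] => true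
  | elm :: rest =>
    if elm == 'A' || elm == 'C' || elm == 'G' || elm == 'T' || elm == 'N' then
      checkLoopA rest
    else
      false

def check_if_line_is_only_sequence (line : String) : Bool :=
  checkLoopA line.toList

-- ===== PORT B =====
def check_if_line_is_only_sequence_alt (line : String) : Bool :=
  let freq : PySem.Dict Char Int :=
    line.toList.foldl (fun d elm => d.insert elm (d.getD elm 0 + 1)) PySem.Dict.empty
  let matched : Int := "ACGTN".toList.foldl (fun acc c => acc + freq.getD c 0) 0
  matched == PySem.Str.len line

-- ===== PRECONDITION & SPEC =====
def Spec_check_if_line_is_only_sequence (line : String) (out : Bool) : Prop := out = check_if_line_is_only_sequence_alt line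
instance (line : String) (out : Bool) : Decidable (Spec_check_if_line_is_only_sequence line out) := by unfold Spec_check_if_line_is_only_sequence; infer_instance

-- ===== CLAIM (what is proved, stated in full; the proofs are below) =====
def Claim_equal_check_if_line_is_only_sequence : Prop := ∀ (line : String), Dom_check_if_line_is_only_sequence line → Spec_check_if_line_is_only_sequence line (check_if_line_is_only_sequence line)

-- ===== LEMMAS AND PROOFS =====

-- the total count of the five allowed letters, as B's second loop computes it
def sum5 (l : List Char) : Nat :=
  l.count 'A' + l.count 'C' + l.count 'G' + l.count 'T' + l.count 'N'

theorem sum5_le_length (l : List Char) : sum5 l ≤ l.length := by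
  induction l with
  | nil => simp [sum5]
  | cons c rest ih =>
    simp only [sum5, List.count_cons, List.length_cons] at *
    by_cases hA : c = 'A' <;> by_cases hC : c = 'C' <;> by_cases hG : c = 'G' <;>
      by_cases hT : c = 'T' <;> by_cases hN : c = 'N' <;> simp_all <;> omega

theorem checkLoopA_eq_sum5 (l : List Char) :
    checkLoopA l = decide (sum5 l = l.length) := by
  induction l with
  | nil => simp [checkLoopA, sum5]
  | cons c rest ih =>
    have hle := sum5_le_length rest
    simp only [checkLoopA, sum5, List.count_cons, List.length_cons] at *
    by_cases hA : c = 'A' <;> by_cases hC : c = 'C' <;> by_cases hG : c = 'G' <;>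
      by_cases hT : c = 'T' <;> by_cases hN : c = 'N' <;>
      simp_all <;> omega

theorem alt_eq_sum5 (line : String) :
    check_if_line_is_only_sequence_alt line = decide (sum5 line.toList = line.toList.length) := by
  unfold check_if_line_is_only_sequence_alt
  rw [show ("ACGTN".toList) = ['A', 'C', 'G', 'T', 'N'] from by decide]
  simp only [List.foldl_cons, List.foldl_nil, PySem.Dict.getD_foldl_insert_add_one,
    PySem.Dict.getD_empty, PySem.Str.len_eq, PySem.Chars.len_eq, sum5]
  rw [Bool.eq_iff_iff, beq_iff_eq, decide_eq_true_iff]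
  omega

-- ===== VERDICT (by name: the statement is the Claim_ definition above) =====
theorem check_if_line_is_only_sequence_spec : Claim_equal_check_if_line_is_only_sequence := by
  intro line _
  unfold Spec_check_if_line_is_only_sequence
  rw [alt_eq_sum5, check_if_line_is_only_sequence, checkLoopA_eq_sum5]
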